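-- pv_equiv track=rewrite | github.com/Zakaji0351/usc-csci571 | test0401.py | getMostVisited
-- ===== SOURCE A (Python) =====
-- def getMostVisited(sprints):
--     # Write your code here
--     from collections import defaultdict
--     adict = defaultdict(int)
--     for i in range(len(sprints) - 1):
--         start = min(sprints[i], sprints[i + 1])
--         end = max(sprints[i], sprints[i + 1])
--         adict[start] += 1
--         adict[end + 1] -= 1
--     max_count = 0
--     current_count = 0
--     most_visited = 0
--     for room in sorted(adict):
--         current_count += adict[room]
--         if current_count > max_count:
--             max_count = current_count
--             most_visited = room
--
--     return most_visited
-- ===== SOURCE B (Python) =====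
-- def getMostVisited(sprints):
--     # Direct per-candidate counting: the most-visited room is the smallest start
--     # point whose interval-coverage count is maximal.
--     intervals = [(min(a, b), max(a, b)) for a, b in zip(sprints, sprints[1:])]
--     lows = sorted(set(lo for lo, _ in intervals))
--     best_room, best_count = 0, 0
--     for room in lows:
--         c = sum(1 for lo, hi in intervals if lo <= room <= hi)
--         if best_count < c:
--             best_room, best_count = room, c
--     return best_room
-- ===== Notes on version B (the rewrite author's own statement) =====
-- stated objective: alternative
-- what changed: Replaces A's boundary-delta dictionary plus sorted-key prefix sweep by direct per-candidate coverage counting: for each distinct interval start point (in ascending order) count the intervals covering it and keep the first strict maximum.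
import Mathlib
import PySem

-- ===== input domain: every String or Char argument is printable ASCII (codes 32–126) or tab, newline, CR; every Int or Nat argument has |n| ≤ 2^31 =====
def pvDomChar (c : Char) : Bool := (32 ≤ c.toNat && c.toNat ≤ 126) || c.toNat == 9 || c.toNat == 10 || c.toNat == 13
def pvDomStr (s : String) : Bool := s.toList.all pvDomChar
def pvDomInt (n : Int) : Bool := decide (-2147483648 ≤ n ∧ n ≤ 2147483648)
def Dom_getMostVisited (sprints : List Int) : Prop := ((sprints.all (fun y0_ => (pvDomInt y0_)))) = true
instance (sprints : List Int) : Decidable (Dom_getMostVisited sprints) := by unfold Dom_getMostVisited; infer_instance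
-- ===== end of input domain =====

-- B replaces A's boundary-delta dictionary + prefix sweep by direct per-candidate
-- coverage counting over the interval list (objective: alternative, not faster).

-- ===== PORT A =====
-- literal port of A: difference dict over interval boundaries, then a sweep over
-- sorted keys carrying (max_count, current_count, most_visited)
def getMostVisited (sprints : List Int) : Int :=
  let adict := (PySem.List.pyRange 0 ((sprints.length : Int) - 1)).foldl
    (fun d i =>
      let s := min (PySem.List.pyGetD sprints i 0) (PySem.List.pyGetD sprints (i + 1) 0)
      let e := max (PySem.List.pyGetD sprints i 0) (PySem.List.pyGetD sprints (i + 1) 0)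
      let d := d.insert s (d.getD s 0 + 1)
      d.insert (e + 1) (d.getD (e + 1) 0 - 1))
    PySem.Dict.empty
  let fin := (PySem.List.sorted adict.keys (fun x => x)).foldl
    (fun (st : Int × Int × Int) room =>
      let cur := st.2.1 + adict.getD room 0
      if st.1 < cur then (cur, cur, room) else (st.1, cur, st.2.2))
    (0, 0, 0)
  fin.2.2

-- ===== PORT B =====
-- literal port of B: normalized adjacent intervals, candidate rooms = sorted set of
-- interval start points, coverage counted directly per candidate
def getMostVisited_alt (sprints : List Int) : Int :=
  let intervals := (sprints.zip (PySem.List.slice sprints (some 1) none)).map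
    (fun p => (min p.1 p.2, max p.1 p.2))
  let lows := PySem.List.sorted (PySem.Set.ofList (intervals.map (fun iv => iv.1))) (fun x => x)
  let fin := lows.foldl
    (fun (st : Int × Int) room =>
      let c : Int := (intervals.countP (fun iv => decide (iv.1 ≤ room) && decide (room ≤ iv.2)) : Int)
      if st.2 < c then (room, c) else st)
    (0, 0)
  fin.1

-- ===== PRECONDITION & SPEC =====
def Spec_getMostVisited (sprints : List Int) (out : Int) : Prop := out = getMostVisited_alt sprints
instance (sprints : List Int) (out : Int) : Decidable (Spec_getMostVisited sprints out) := by unfold Spec_getMostVisited; infer_instance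

-- ===== CLAIM (what is proved, stated in full; the proofs are below) =====
def Claim_equal_getMostVisited : Prop := ∀ (sprints : List Int), Dom_getMostVisited sprints → Spec_getMostVisited sprints (getMostVisited sprints)

-- ===== LEMMAS AND PROOFS =====

-- the normalized adjacent-pair intervals both programs work on
def pvNrm (p : Int × Int) : Int × Int := (min p.1 p.2, max p.1 p.2)
def pvIvs (xs : List Int) : List (Int × Int) := (xs.zip xs.tail).map pvNrm
-- coverage of room p by the intervals of l
def pvCovP (p : Int) (iv : Int × Int) : Bool := decide (iv.1 ≤ p) && decide (p ≤ iv.2)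
def pvCov (l : List (Int × Int)) (p : Int) : Int := (l.countP (pvCovP p) : Int)
-- A's boundary delta at key k
def pvDlt (l : List (Int × Int)) (k : Int) : Int :=
  ((l.countP (fun iv => iv.1 == k)) : Int) - ((l.countP (fun iv => iv.2 + 1 == k)) : Int)
-- all boundary points of l (A's dict keys, with repetitions)
def pvPts (l : List (Int × Int)) : List Int := l.flatMap (fun iv => [iv.1, iv.2 + 1])
-- one step of A's dict-building loop
def pvDstep (d : PySem.Dict Int Int) (iv : Int × Int) : PySem.Dict Int Int :=
  let d' := d.insert iv.1 (d.getD iv.1 0 + 1)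
  d'.insert (iv.2 + 1) (d'.getD (iv.2 + 1) 0 - 1)
-- abstract "first strict record" fold shared by both sweeps
def pvSel (g : Int → Int) (S : List Int) (st : Int × Int) : Int × Int :=
  S.foldl (fun st r => if st.1 < g r then (g r, r) else st) st
def pvFm (g : Int → Int) (b : Int) (S : List Int) : Int :=
  S.foldl (fun m r => max m (g r)) b

lemma pvZipRange (xs : List Int) :
    (PySem.List.pyRange 0 ((xs.length : Int) - 1)).map
      (fun i => (PySem.List.pyGetD xs i 0, PySem.List.pyGetD xs (i + 1) 0)) = xs.zip xs.tail := by
  cases xs with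
  | nil => rfl
  | cons a t =>
    have h1 : (((a :: t).length : Int)) - 1 = ((t.length : Nat) : Int) := by
      simp [List.length_cons]
    rw [h1, PySem.List.pyRange_zero_natCast, List.map_map]
    apply List.ext_getElem
    · simp
    · intro i hi1 hi2
      have hi : i < t.length := by simpa using hi1
      simp only [List.getElem_map, List.getElem_range, Function.comp_apply, List.getElem_zip]
      have e1 : PySem.List.pyGetD (a :: t) ((i : Nat) : Int) 0 = (a :: t).getD i 0 :=
        PySem.List.pyGetD_natCast _ _ _
      have e2 : PySem.List.pyGetD (a :: t) (((i : Nat) : Int) + 1) 0 = (a :: t).getD (i + 1) 0 := by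
        rw [show (((i : Nat) : Int) + 1) = (((i + 1 : Nat) : Nat) : Int) by push_cast; ring]
        exact PySem.List.pyGetD_natCast _ _ _
      rw [e1, e2]
      simp only [List.tail_cons]
      congr 1
      · rw [List.getD_eq_getElem _ _ (by simpa using Nat.lt_succ_of_lt hi)]
      · rw [List.getD_eq_getElem _ _ (by simpa using Nat.succ_lt_succ hi)]
        simp

lemma pvDictGetD (l : List (Int × Int)) (h : ∀ iv ∈ l, iv.1 ≤ iv.2) :
    ∀ (d : PySem.Dict Int Int) (k : Int),
      (l.foldl pvDstep d).getD k 0 = d.getD k 0 + pvDlt l k := by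
  induction l with
  | nil =>
    intro d k
    simp [pvDlt]
  | cons a t ih =>
    intro d k
    have hat : a.1 ≤ a.2 := h a List.mem_cons_self
    have hne : a.1 ≠ a.2 + 1 := by omega
    have hstep : (a :: t).foldl pvDstep d = t.foldl pvDstep (pvDstep d a) := rfl
    rw [hstep, ih (fun iv hiv => h iv (List.mem_cons_of_mem _ hiv))]
    have hd : (pvDstep d a).getD k 0
        = (if k = a.2 + 1 then d.getD (a.2 + 1) 0 - 1
           else if k = a.1 then d.getD a.1 0 + 1 else d.getD k 0) := by
      show ((d.insert a.1 (d.getD a.1 0 + 1)).insert (a.2 + 1)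
        ((d.insert a.1 (d.getD a.1 0 + 1)).getD (a.2 + 1) 0 - 1)).getD k 0 = _
      rw [PySem.Dict.getD_insert, PySem.Dict.getD_insert, PySem.Dict.getD_insert]
      rw [if_neg (by omega : ¬ a.2 + 1 = a.1)]
    rw [hd]
    simp only [pvDlt, List.countP_cons]
    by_cases h1 : k = a.2 + 1 <;> by_cases h2 : k = a.1 <;>
      simp [h1, h2, beq_iff_eq, hne] <;> omega

lemma pvDictKeysMem (l : List (Int × Int)) :
    ∀ (d : PySem.Dict Int Int) (k : Int),
      (k ∈ (l.foldl pvDstep d).keys ↔ k ∈ d.keys ∨ k ∈ pvPts l) := by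
  have hmem : ∀ (d : PySem.Dict Int Int) (kk : Int) (v : Int) (j : Int),
      j ∈ (d.insert kk v).keys ↔ j ∈ d.keys ∨ j = kk := by
    intro d kk v j
    rw [← PySem.Dict.contains_iff_mem_keys, PySem.Dict.contains_insert,
      ← PySem.Dict.contains_iff_mem_keys]
    simp [Bool.or_eq_true, beq_iff_eq]
    tauto
  induction l with
  | nil => intro d k; simp [pvPts]
  | cons a t ih =>
    intro d k
    have hstep : (a :: t).foldl pvDstep d = t.foldl pvDstep (pvDstep d a) := rfl
    have hpts : pvPts (a :: t) = a.1 :: (a.2 + 1) :: pvPts t := by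
      simp [pvPts]
    rw [hstep, ih, hpts]
    show k ∈ ((d.insert a.1 _).insert (a.2 + 1) _).keys ∨ _ ↔ _
    rw [hmem, hmem]
    simp only [List.mem_cons]
    tauto

lemma pvDictKeysNodup (l : List (Int × Int)) :
    ∀ (d : PySem.Dict Int Int), d.keys.Nodup → (l.foldl pvDstep d).keys.Nodup := by
  induction l with
  | nil => intro d hd; exact hd
  | cons a t ih =>
    intro d hd
    have hstep : (a :: t).foldl pvDstep d = t.foldl pvDstep (pvDstep d a) := rfl
    rw [hstep]
    exact ih _ (PySem.Dict.nodup_keys_insert _ _ _ (PySem.Dict.nodup_keys_insert _ _ _ hd))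

-- pvFm basics
lemma pvFm_base_le (g : Int → Int) (S : List Int) : ∀ b, b ≤ pvFm g b S := by
  induction S with
  | nil => intro b; simp [pvFm]
  | cons a t ih =>
    intro b
    have : pvFm g b (a :: t) = pvFm g (max b (g a)) t := rfl
    rw [this]
    exact le_trans (le_max_left _ _) (ih _)
lemma pvFm_mem_le (g : Int → Int) (S : List Int) : ∀ b, ∀ r ∈ S, g r ≤ pvFm g b S := by
  induction S with
  | nil => intro b r hr; simp at hr
  | cons a t ih =>
    intro b r hr
    have hstep : pvFm g b (a :: t) = pvFm g (max b (g a)) t := rfl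
    rcases List.mem_cons.mp hr with rfl | hr
    · rw [hstep]; exact le_trans (le_max_right _ _) (pvFm_base_le g t _)
    · rw [hstep]; exact ih _ r hr
lemma pvFm_le (g : Int → Int) (S : List Int) :
    ∀ b c, b ≤ c → (∀ r ∈ S, g r ≤ c) → pvFm g b S ≤ c := by
  induction S with
  | nil => intro b c hb _; simpa [pvFm] using hb
  | cons a t ih =>
    intro b c hb h
    have hstep : pvFm g b (a :: t) = pvFm g (max b (g a)) t := rfl
    rw [hstep]
    exact ih _ _ (max_le hb (h a (List.mem_cons_self))) (fun r hr => h r (List.mem_cons_of_mem _ hr))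
lemma pvFm_attained (g : Int → Int) (S : List Int) :
    ∀ b, pvFm g b S = b ∨ ∃ r ∈ S, pvFm g b S = g r := by
  induction S with
  | nil => intro b; left; simp [pvFm]
  | cons a t ih =>
    intro b
    have hstep : pvFm g b (a :: t) = pvFm g (max b (g a)) t := rfl
    rw [hstep]
    rcases ih (max b (g a)) with h | ⟨r, hr, hre⟩
    · rcases le_total (g a) b with hab | hab
      · left; rw [h]; exact max_eq_left hab
      · right; exact ⟨a, List.mem_cons_self, by rw [h]; exact max_eq_right hab⟩
    · right; exact ⟨r, List.mem_cons_of_mem _ hr, hre⟩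

-- pvSel basics
lemma pvSel_of_le (g : Int → Int) (S : List Int) :
    ∀ mx mv, (∀ r ∈ S, g r ≤ mx) → pvSel g S (mx, mv) = (mx, mv) := by
  induction S with
  | nil => intro mx mv _; rfl
  | cons a t ih =>
    intro mx mv h
    have hsel : pvSel g (a :: t) (mx, mv)
        = pvSel g t (if mx < g a then (g a, a) else (mx, mv)) := rfl
    rw [hsel, if_neg (not_lt.mpr (h a List.mem_cons_self))]
    exact ih mx mv (fun r hr => h r (List.mem_cons_of_mem _ hr))
lemma pvSel_snd (g : Int → Int) (S : List Int) :
    ∀ mx mv x, mx < pvFm g mx S → S.find? (fun r => g r == pvFm g mx S) = some x →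
      (pvSel g S (mx, mv)).2 = x := by
  induction S with
  | nil =>
    intro mx mv x hlt _
    exact absurd hlt (by simp [pvFm])
  | cons a t ih =>
    intro mx mv x hlt hfind
    have hsel : pvSel g (a :: t) (mx, mv)
        = pvSel g t (if mx < g a then (g a, a) else (mx, mv)) := rfl
    have hfm : pvFm g mx (a :: t) = pvFm g (max mx (g a)) t := rfl
    by_cases h1 : mx < g a
    · have hmax : max mx (g a) = g a := max_eq_right (le_of_lt h1)
      by_cases h2 : ∀ r ∈ t, g r ≤ g a
      · have hM : pvFm g mx (a :: t) = g a := by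
          rw [hfm, hmax]
          exact le_antisymm (pvFm_le g t _ _ le_rfl h2) (pvFm_base_le g t _)
        have hx : x = a := by
          rw [List.find?_cons_of_pos (by simp [hM])] at hfind
          exact (Option.some_inj.mp hfind).symm
        rw [hsel, if_pos h1, pvSel_of_le g t _ _ h2, hx]
      · push Not at h2
        obtain ⟨r, hr, hgr⟩ := h2
        have hlt2 : g a < pvFm g (g a) t :=
          lt_of_lt_of_le hgr (pvFm_mem_le g t _ r hr)
        have hM : pvFm g mx (a :: t) = pvFm g (g a) t := by rw [hfm, hmax]
        have hfind2 : t.find? (fun r => g r == pvFm g (g a) t) = some x := by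
          rw [List.find?_cons_of_neg (by simp [hM]; exact ne_of_lt hlt2)] at hfind
          rw [hM] at hfind
          exact hfind
        rw [hsel, if_pos h1]
        exact ih (g a) a x hlt2 hfind2
    · have hmax : max mx (g a) = mx := max_eq_left (le_of_not_gt h1)
      have hM : pvFm g mx (a :: t) = pvFm g mx t := by rw [hfm, hmax]
      have hlt2 : mx < pvFm g mx t := by rw [hM] at hlt; exact hlt
      have hfind2 : t.find? (fun r => g r == pvFm g mx t) = some x := by
        rw [List.find?_cons_of_neg (by
          simp [hM]
          exact ne_of_lt (lt_of_le_of_lt (le_of_not_gt h1) hlt2))] at hfind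
        rw [hM] at hfind
        exact hfind
      rw [hsel, if_neg h1]
      exact ih mx mv x hlt2 hfind2

-- find? on a strictly increasing list, characterized by values
lemma pvFind_sorted {K : List Int} (hK : K.Pairwise (· < ·)) (p : Int → Bool) {x : Int} :
    K.find? p = some x → x ∈ K ∧ p x = true ∧ ∀ y ∈ K, y < x → p y = false := by
  induction K with
  | nil => intro h; simp at h
  | cons a t ih =>
    intro hfind
    obtain ⟨ha, ht⟩ := List.pairwise_cons.mp hK
    by_cases hpa : p a = true
    · rw [List.find?_cons_of_pos hpa] at hfind
      obtain rfl : a = x := Option.some_inj.mp hfind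
      refine ⟨List.mem_cons_self, hpa, ?_⟩
      intro y hy hlt
      rcases List.mem_cons.mp hy with rfl | hy
      · exact absurd hlt (lt_irrefl _)
      · exact absurd hlt (not_lt.mpr (le_of_lt (ha y hy)))
    · rw [List.find?_cons_of_neg (by simpa using hpa)] at hfind
      obtain ⟨hx, hpx, hfst⟩ := ih ht hfind
      refine ⟨List.mem_cons_of_mem _ hx, hpx, ?_⟩
      intro y hy hlt
      rcases List.mem_cons.mp hy with rfl | hy
      · exact Bool.eq_false_iff.mpr (by simpa using hpa)
      · exact hfst y hy hlt
lemma pvFind_sorted' {K : List Int} (hK : K.Pairwise (· < ·)) (p : Int → Bool) {x : Int} :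
    x ∈ K → p x = true → (∀ y ∈ K, y < x → p y = false) → K.find? p = some x := by
  induction K with
  | nil => intro h; simp at h
  | cons a t ih =>
    intro hx hpx hfst
    obtain ⟨ha, ht⟩ := List.pairwise_cons.mp hK
    rcases List.mem_cons.mp hx with rfl | hx
    · rw [List.find?_cons_of_pos hpx]
    · have hax : a < x := ha x hx
      have hpa : p a = false := hfst a List.mem_cons_self hax
      rw [List.find?_cons_of_neg (by simp [hpa])]
      exact ih ht hx hpx (fun y hy hlt => hfst y (List.mem_cons_of_mem _ hy) hlt)

-- A's sweep fold, named
def pvAswp (l : List (Int × Int)) (K : List Int) (st : Int × Int × Int) : Int × Int × Int :=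
  K.foldl
    (fun (st : Int × Int × Int) room =>
      let cur := st.2.1 + pvDlt l room
      if st.1 < cur then (cur, cur, room) else (st.1, cur, st.2.2)) st

-- A's sweep equals the abstract record fold when the running sum tracks coverage
lemma pvSweepA (l : List (Int × Int)) :
    ∀ (K : List Int), K.Pairwise (· < ·) →
    ∀ (cur0 mx mv : Int),
      (∀ p ∈ K, cur0 + ((K.filter (fun k => decide (k ≤ p))).map (pvDlt l)).sum = pvCov l p) →
      ((pvAswp l K (mx, cur0, mv)).1, (pvAswp l K (mx, cur0, mv)).2.2) = pvSel (pvCov l) K (mx, mv) := by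
  intro K
  induction K with
  | nil => intro _ cur0 mx mv _; rfl
  | cons r t ih =>
    intro hp cur0 mx mv H
    obtain ⟨hr, ht⟩ := List.pairwise_cons.mp hp
    have hfilr : t.filter (fun k => decide (k ≤ r)) = [] :=
      List.filter_eq_nil_iff.mpr (fun k hk => by simp; exact hr k hk)
    have hcov : cur0 + pvDlt l r = pvCov l r := by
      have hHr := H r List.mem_cons_self
      rw [List.filter_cons_of_pos (by simp), hfilr] at hHr
      simpa using hHr
    have H' : ∀ p ∈ t, pvCov l r + ((t.filter (fun k => decide (k ≤ p))).map (pvDlt l)).sum = pvCov l p := by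
      intro p hp'
      have hrp : r < p := hr p hp'
      have hHp := H p (List.mem_cons_of_mem _ hp')
      rw [List.filter_cons_of_pos (by simp; exact le_of_lt hrp)] at hHp
      rw [List.map_cons, List.sum_cons] at hHp
      rw [← hcov]
      linarith
    have hstepA : pvAswp l (r :: t) (mx, cur0, mv)
        = pvAswp l t (if mx < cur0 + pvDlt l r then (cur0 + pvDlt l r, cur0 + pvDlt l r, r)
                      else (mx, cur0 + pvDlt l r, mv)) := rfl
    have hstepS : pvSel (pvCov l) (r :: t) (mx, mv)
        = pvSel (pvCov l) t (if mx < pvCov l r then (pvCov l r, r) else (mx, mv)) := rfl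
    rw [hstepA, hstepS, hcov]
    by_cases hb : mx < pvCov l r
    · rw [if_pos hb, if_pos hb]
      exact ih ht (pvCov l r) (pvCov l r) r H'
    · rw [if_neg hb, if_neg hb]
      exact ih ht (pvCov l r) mx mv H'

-- counting membership in a cons, with a fresh head
lemma pvCountP_mem_cons (l : List (Int × Int)) (f : (Int × Int) → Int) (k : Int) (t : List Int)
    (hk : k ∉ t) :
    l.countP (fun iv => decide (f iv ∈ k :: t))
      = l.countP (fun iv => f iv == k) + l.countP (fun iv => decide (f iv ∈ t)) := by
  induction l with
  | nil => simp
  | cons a s ih =>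
    simp only [List.countP_cons, ih]
    by_cases h1 : f a = k
    · simp [h1, hk]; omega
    · by_cases h2 : f a ∈ t
      · simp [h1, h2]
        omega
      · simp [h1, h2]

-- sum over a Nodup key list of per-key counts is one membership count
lemma pvSumCount (l : List (Int × Int)) (f : (Int × Int) → Int) :
    ∀ (S : List Int), S.Nodup →
      (S.map (fun k => ((l.countP (fun iv => f iv == k)) : Int))).sum
        = ((l.countP (fun iv => decide (f iv ∈ S))) : Int) := by
  intro S
  induction S with
  | nil => simp
  | cons k t ih =>
    intro hnd
    obtain ⟨hk, ht⟩ := List.nodup_cons.mp hnd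
    rw [List.map_cons, List.sum_cons, ih ht, pvCountP_mem_cons l f k t hk]
    push_cast
    ring

-- difference of boundary counts is coverage
lemma pvCountSub (l : List (Int × Int)) (p : Int) (h : ∀ iv ∈ l, iv.1 ≤ iv.2) :
    ((l.countP (fun iv => decide (iv.1 ≤ p))) : Int)
      - ((l.countP (fun iv => decide (iv.2 + 1 ≤ p))) : Int) = pvCov l p := by
  induction l with
  | nil => simp [pvCov]
  | cons a t ih =>
    have hat : a.1 ≤ a.2 := h a List.mem_cons_self
    have iht := ih (fun iv hiv => h iv (List.mem_cons_of_mem _ hiv))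
    simp only [pvCov, pvCovP, List.countP_cons] at iht ⊢
    simp only [Bool.and_eq_true, decide_eq_true_eq]
    split_ifs <;> push_cast <;> omega

-- sum of a map of differences
lemma pvSumSub (S : List Int) (f g : Int → Int) :
    (S.map (fun k => f k - g k)).sum = (S.map f).sum - (S.map g).sum := by
  induction S with
  | nil => simp
  | cons a t ih => simp [ih]; ring

-- every nonempty Int list has a maximum element
lemma pvExistsMax (m : List Int) (h : m ≠ []) : ∃ q ∈ m, ∀ x ∈ m, x ≤ q := by
  obtain ⟨q, hq⟩ := List.maximum_ne_bot_of_ne_nil h |> Option.ne_none_iff_exists'.mp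
  exact ⟨q, List.maximum_mem hq, fun x hx => List.le_maximum_of_mem hx hq⟩

-- B's fold is pvSel with the state components swapped
lemma pvSelSwap (g : Int → Int) (S : List Int) :
    ∀ a b, S.foldl (fun (st : Int × Int) r => if st.2 < g r then (r, g r) else st) (a, b)
      = ((pvSel g S (b, a)).2, (pvSel g S (b, a)).1) := by
  induction S with
  | nil => intro a b; rfl
  | cons r t ih =>
    intro a b
    have h1 : (r :: t).foldl (fun (st : Int × Int) r => if st.2 < g r then (r, g r) else st) (a, b)
        = t.foldl _ (if b < g r then (r, g r) else (a, b)) := rfl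
    have h2 : pvSel g (r :: t) (b, a) = pvSel g t (if b < g r then (g r, r) else (b, a)) := rfl
    rw [h1, h2]
    by_cases hb : b < g r
    · simp only [hb, if_pos]; exact ih _ _
    · simp only [hb, if_neg, not_false_iff]; exact ih _ _

-- sum of deltas over all keys ≤ p equals coverage of p
lemma pvPrefixSum (l : List (Int × Int)) (K : List Int) (hnd : K.Nodup)
    (hnorm : ∀ iv ∈ l, iv.1 ≤ iv.2)
    (hcomp : ∀ iv ∈ l, iv.1 ∈ K ∧ iv.2 + 1 ∈ K) (p : Int) :
    ((K.filter (fun k => decide (k ≤ p))).map (pvDlt l)).sum = pvCov l p := by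
  have hndS : (K.filter (fun k => decide (k ≤ p))).Nodup := hnd.filter _
  have h1 : ((K.filter (fun k => decide (k ≤ p))).map (pvDlt l)).sum
      = ((K.filter (fun k => decide (k ≤ p))).map
          (fun k => ((l.countP (fun iv => iv.1 == k)) : Int))).sum
        - ((K.filter (fun k => decide (k ≤ p))).map
          (fun k => ((l.countP (fun iv => iv.2 + 1 == k)) : Int))).sum := by
    rw [← pvSumSub]
    rfl
  rw [h1, pvSumCount l (fun iv => iv.1) _ hndS, pvSumCount l (fun iv => iv.2 + 1) _ hndS]
  have hc1 : l.countP (fun iv => decide (iv.1 ∈ K.filter (fun k => decide (k ≤ p))))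
      = l.countP (fun iv => decide (iv.1 ≤ p)) := by
    apply List.countP_congr
    intro iv hiv
    simp only [decide_eq_true_eq, List.mem_filter, decide_eq_true_eq]
    exact ⟨fun h => h.2, fun h => ⟨(hcomp iv hiv).1, h⟩⟩
  have hc2 : l.countP (fun iv => decide (iv.2 + 1 ∈ K.filter (fun k => decide (k ≤ p))))
      = l.countP (fun iv => decide (iv.2 + 1 ≤ p)) := by
    apply List.countP_congr
    intro iv hiv
    simp only [decide_eq_true_eq, List.mem_filter, decide_eq_true_eq]
    exact ⟨fun h => h.2, fun h => ⟨(hcomp iv hiv).2, h⟩⟩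
  rw [hc1, hc2]
  exact pvCountSub l p hnorm

-- every positively covered point is dominated by some interval start point
lemma pvShift (l : List (Int × Int)) (p : Int) (h : 0 < pvCov l p) :
    ∃ q, q ∈ l.map (fun iv => iv.1) ∧ q ≤ p ∧ pvCov l p ≤ pvCov l q := by
  have hpos : 0 < l.countP (pvCovP p) := by
    have := h
    simp only [pvCov] at this
    exact_mod_cast this
  have hC : l.filter (pvCovP p) ≠ [] := by
    rw [List.countP_eq_length_filter] at hpos
    exact List.ne_nil_of_length_pos hpos
  have hmne : (l.filter (pvCovP p)).map (fun iv => iv.1) ≠ [] := by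
    simpa using hC
  obtain ⟨q, hqm, hqmax⟩ := pvExistsMax _ hmne
  obtain ⟨iv0, hiv0, rfl⟩ := List.mem_map.mp hqm
  have hiv0f := List.mem_filter.mp hiv0
  have hiv0c : iv0.1 ≤ p ∧ p ≤ iv0.2 := by
    have := hiv0f.2
    simp only [pvCovP, Bool.and_eq_true, decide_eq_true_eq] at this
    exact this
  refine ⟨iv0.1, List.mem_map.mpr ⟨iv0, hiv0f.1, rfl⟩, hiv0c.1, ?_⟩
  have hmono : l.countP (pvCovP p) ≤ l.countP (pvCovP iv0.1) := by
    apply List.countP_mono_left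
    intro iv hivl hivp
    have h2 : iv.1 ≤ p ∧ p ≤ iv.2 := by
      simp only [pvCovP, Bool.and_eq_true, decide_eq_true_eq] at hivp
      exact hivp
    have h1 : iv.1 ≤ iv0.1 :=
      hqmax _ (List.mem_map.mpr ⟨iv, List.mem_filter.mpr ⟨hivl, hivp⟩, rfl⟩)
    simp only [pvCovP, Bool.and_eq_true, decide_eq_true_eq]
    exact ⟨h1, le_trans hiv0c.1 h2.2⟩
  simp only [pvCov]
  exact_mod_cast hmono

-- the two record folds agree
lemma pvMain (l : List (Int × Int)) (K L : List Int) (hKp : K.Pairwise (· < ·)) (hLp : L.Pairwise (· < ·))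
    (hKm : ∀ k, k ∈ K ↔ k ∈ pvPts l) (hLm : ∀ k, k ∈ L ↔ k ∈ l.map (fun iv => iv.1)) :
    (pvSel (pvCov l) K (0, 0)).2 = (pvSel (pvCov l) L (0, 0)).2 := by
  have hsub : ∀ k ∈ L, k ∈ K := by
    intro k hk
    obtain ⟨iv, hiv, rfl⟩ := List.mem_map.mp ((hLm k).mp hk)
    refine (hKm _).mpr ?_
    simp only [pvPts, List.mem_flatMap]
    exact ⟨iv, hiv, by simp⟩
  set MK := pvFm (pvCov l) 0 K with hMK
  set ML := pvFm (pvCov l) 0 L with hML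
  have hLK : ML ≤ MK :=
    pvFm_le _ _ _ _ (pvFm_base_le _ _ _) (fun r hr => pvFm_mem_le _ _ _ r (hsub r hr))
  have hKL : MK ≤ ML := by
    apply pvFm_le _ _ _ _ (pvFm_base_le _ _ _)
    intro k hk
    by_cases hc : 0 < pvCov l k
    · obtain ⟨q, hqm, _, hqcov⟩ := pvShift l k hc
      exact le_trans hqcov (pvFm_mem_le _ _ _ q ((hLm q).mpr hqm))
    · exact le_trans (not_lt.mp hc) (pvFm_base_le _ _ _)
  have hMeq : MK = ML := le_antisymm hKL hLK
  by_cases hM : MK ≤ 0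
  · rw [pvSel_of_le _ _ _ _ (fun r hr => le_trans (pvFm_mem_le _ K 0 r hr) hM),
      pvSel_of_le _ _ _ _ (fun r hr =>
        le_trans (le_trans (pvFm_mem_le _ L 0 r hr) hLK) hM)]
  · push Not at hM
    have hex : ∃ r ∈ K, pvCov l r = MK := by
      rcases pvFm_attained (pvCov l) K 0 with h0 | ⟨r, hr, hre⟩
      · exact absurd (hMK.trans h0) (by intro hcon; rw [hcon] at hM; exact lt_irrefl _ hM)
      · exact ⟨r, hr, hre.symm⟩
    obtain ⟨r0, hr0, hr0cov⟩ := hex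
    have hfindK : ∃ x, K.find? (fun r => pvCov l r == MK) = some x :=
      Option.isSome_iff_exists.mp
        (List.find?_isSome.mpr ⟨r0, hr0, by simp [hr0cov]⟩)
    obtain ⟨x, hx⟩ := hfindK
    obtain ⟨hxK, hxcov, hxfst⟩ := pvFind_sorted hKp _ hx
    have hxcov' : pvCov l x = MK := by simpa using hxcov
    have hxL : x ∈ L := by
      obtain ⟨q, hqm, hqle, hqcov⟩ := pvShift l x (by rw [hxcov']; exact hM)
      have hqL : q ∈ L := (hLm q).mpr hqm
      have hqK : q ∈ K := hsub q hqL
      have hqMK : pvCov l q = MK :=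
        le_antisymm (pvFm_mem_le _ K 0 q hqK) (by rw [← hxcov']; exact hqcov)
      rcases lt_or_eq_of_le hqle with hlt | heq
      · exact absurd (hxfst q hqK hlt) (by simp [hqMK])
      · rw [← heq]; exact hqL
    have hfindL : L.find? (fun r => pvCov l r == MK) = some x :=
      pvFind_sorted' hLp _ hxL (by simp [hxcov'])
        (fun y hy hlt => by
          have := hxfst y (hsub y hy) hlt
          simpa using this)
    rw [pvSel_snd (pvCov l) K 0 0 x (by rw [← hMK]; exact hM) (by rw [← hMK]; exact hx),
      pvSel_snd (pvCov l) L 0 0 x (by rw [← hML, ← hMeq]; exact hM)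
        (by rw [← hML, ← hMeq]; exact hfindL)]

-- A's range-indexed dict loop is the fold of pvDstep over the interval list
lemma pvFoldDict (xs : List Int) :
    (PySem.List.pyRange 0 ((xs.length : Int) - 1)).foldl
      (fun d i => pvDstep d (pvNrm (PySem.List.pyGetD xs i 0, PySem.List.pyGetD xs (i + 1) 0)))
      PySem.Dict.empty = (pvIvs xs).foldl pvDstep PySem.Dict.empty := by
  conv_rhs => rw [pvIvs, ← pvZipRange xs, List.map_map, List.foldl_map]
  rfl

-- ===== VERDICT (by name: the statement is the Claim_ definition above) =====
theorem getMostVisited_spec : Claim_equal_getMostVisited := by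
  intro xs _
  show getMostVisited xs = getMostVisited_alt xs
  have hnorm : ∀ iv ∈ pvIvs xs, iv.1 ≤ iv.2 := by
    intro iv hiv
    obtain ⟨p, _, rfl⟩ := List.mem_map.mp hiv
    exact min_le_max
  -- the two candidate lists
  set K := PySem.List.sorted (PySem.Set.ofList (pvPts (pvIvs xs))) (fun x => x) with hK
  set L := PySem.List.sorted (PySem.Set.ofList ((pvIvs xs).map (fun iv => iv.1))) (fun x => x) with hL
  have hKp : K.Pairwise (· < ·) := PySem.List.sorted_ofList_pairwise_lt _
  have hLp : L.Pairwise (· < ·) := PySem.List.sorted_ofList_pairwise_lt _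
  have hKnd : K.Nodup := hKp.imp (fun h => ne_of_lt h)
  have hKm : ∀ k, k ∈ K ↔ k ∈ pvPts (pvIvs xs) := by
    intro k
    rw [hK, PySem.List.mem_sorted]
    exact PySem.Set.mem_ofList _ _
  have hLm : ∀ k, k ∈ L ↔ k ∈ (pvIvs xs).map (fun iv => iv.1) := by
    intro k
    rw [hL, PySem.List.mem_sorted]
    exact PySem.Set.mem_ofList _ _
  have hcomp : ∀ iv ∈ pvIvs xs, iv.1 ∈ K ∧ iv.2 + 1 ∈ K := by
    intro iv hiv
    constructor <;> refine (hKm _).mpr ?_ <;>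
      · simp only [pvPts, List.mem_flatMap]
        exact ⟨iv, hiv, by simp⟩
  -- reduce port A
  have hgetd : ∀ r, ((pvIvs xs).foldl pvDstep PySem.Dict.empty).getD r 0 = pvDlt (pvIvs xs) r := by
    intro r
    rw [pvDictGetD _ hnorm, PySem.Dict.getD_empty, zero_add]
  have hkeys : PySem.List.sorted ((pvIvs xs).foldl pvDstep PySem.Dict.empty).keys (fun x => x) = K := by
    apply PySem.List.sorted_eq_sorted_of_perm _ _ _ (fun a b h => h)
    apply (List.perm_ext_iff_of_nodup
      (pvDictKeysNodup _ _ (by rw [PySem.Dict.keys_empty]; exact List.nodup_nil))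
      (PySem.Set.nodup_ofList _)).mpr
    intro k
    rw [pvDictKeysMem, PySem.Dict.keys_empty, PySem.Set.mem_ofList]
    simp
  have hA : getMostVisited xs = (pvAswp (pvIvs xs) K (0, 0, 0)).2.2 := by
    have e1 : getMostVisited xs =
        ((PySem.List.sorted
            ((PySem.List.pyRange 0 ((xs.length : Int) - 1)).foldl
              (fun d i => pvDstep d (pvNrm (PySem.List.pyGetD xs i 0, PySem.List.pyGetD xs (i + 1) 0)))
              PySem.Dict.empty).keys (fun x => x)).foldl
          (fun (st : Int × Int × Int) room =>
            let cur := st.2.1 +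
              ((PySem.List.pyRange 0 ((xs.length : Int) - 1)).foldl
                (fun d i => pvDstep d (pvNrm (PySem.List.pyGetD xs i 0, PySem.List.pyGetD xs (i + 1) 0)))
                PySem.Dict.empty).getD room 0
            if st.1 < cur then (cur, cur, room) else (st.1, cur, st.2.2))
          (0, 0, 0)).2.2 := rfl
    rw [e1]
    simp only [pvFoldDict]
    simp only [hgetd]
    rw [hkeys]
    rfl
  have hB : getMostVisited_alt xs = (pvSel (pvCov (pvIvs xs)) L (0, 0)).2 := by
    have e2 : getMostVisited_alt xs =
        ((PySem.List.sorted
            (PySem.Set.ofList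
              (((xs.zip (PySem.List.slice xs (some 1) none)).map pvNrm).map (fun iv => iv.1)))
            (fun x => x)).foldl
          (fun (st : Int × Int) room =>
            if st.2 < pvCov ((xs.zip (PySem.List.slice xs (some 1) none)).map pvNrm) room
            then (room, pvCov ((xs.zip (PySem.List.slice xs (some 1) none)).map pvNrm) room)
            else st)
          (0, 0)).1 := rfl
    have hiv : (xs.zip (PySem.List.slice xs (some 1) none)).map pvNrm = pvIvs xs := by
      rw [PySem.List.slice_from xs (by norm_num : (0 : Int) ≤ 1)]
      simp only [Int.toNat_one, List.drop_one]
      rfl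
    rw [e2]
    simp only [hiv]
    rw [pvSelSwap (pvCov (pvIvs xs)) L 0 0]
  have hsw := pvSweepA (pvIvs xs) K hKp 0 0 0
    (fun p _ => by rw [zero_add]; exact pvPrefixSum (pvIvs xs) K hKnd hnorm hcomp p)
  have hAK : (pvAswp (pvIvs xs) K (0, 0, 0)).2.2 = (pvSel (pvCov (pvIvs xs)) K (0, 0)).2 := by
    have h := congrArg Prod.snd hsw
    simpa using h
  rw [hA, hB, hAK]
  exact pvMain (pvIvs xs) K L hKp hLp hKm hLm
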